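-- pv_equiv track=rewrite | github.com/akadjoker/BuGLEs | scripts/tests/benchmark_hotspots.py | bench_class_array_index
-- ===== SOURCE A (Python) =====
-- class BenchPoint:
--     def __init__(self, x, y):
--         self.x = x
--         self.y = y
--
-- def bench_class_array_index(n):
--     arr = []
--     i = 0
--     while i < n:
--         arr.append(BenchPoint(i, i + 1))
--         i = i + 1
--
--     s = 0
--     i = 0
--     while i < n:
--         p = arr[i]
--         s = s + p.x + p.y
--         p.x = p.x + 1
--         i = i + 1
--     return s
-- ===== SOURCE B (Python) =====
-- def bench_class_array_index(n):
--     # Closed form: sum over i in [0, n) of (i + (i+1)) = n*n; empty loop for n <= 0.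
--     return n * n if n > 0 else 0
-- ===== Notes on version B (the rewrite author's own statement) =====
-- stated objective: faster
-- what changed: Replaces building an array of point objects and summing x+y in a second loop by the closed form n*n (0 for n <= 0).
import Mathlib
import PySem

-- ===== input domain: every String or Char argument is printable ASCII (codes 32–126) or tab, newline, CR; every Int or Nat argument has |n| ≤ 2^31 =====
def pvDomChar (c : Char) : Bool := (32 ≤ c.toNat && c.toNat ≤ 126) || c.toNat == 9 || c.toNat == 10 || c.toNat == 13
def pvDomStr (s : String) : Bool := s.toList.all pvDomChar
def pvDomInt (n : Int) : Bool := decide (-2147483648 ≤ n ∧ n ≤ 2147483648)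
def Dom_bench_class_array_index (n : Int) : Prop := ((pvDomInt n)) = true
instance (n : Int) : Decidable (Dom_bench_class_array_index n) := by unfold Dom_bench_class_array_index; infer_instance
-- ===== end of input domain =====

-- B replaces A’s build-array-then-sum loops by the closed form n*n (0 for n ≤ 0): asymptotically faster, measured faster.
-- ===== PORT A =====
-- A BenchPoint is a mutable pair (x, y); the array is a List (Int × Int).
-- first while loop: arr.append(BenchPoint(i, i+1)); i = i + 1
def pvBuildArr (n i : Int) (arr : List (Int × Int)) : List (Int × Int) :=
  if i < n then pvBuildArr n (i + 1) (arr ++ [(i, i + 1)]) else arr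
termination_by (n - i).toNat
decreasing_by omega

-- second while loop: p = arr[i]; s = s + p.x + p.y; p.x = p.x + 1 (in-place update of arr[i])
def pvSumLoop (n i : Int) (arr : List (Int × Int)) (s : Int) : Int :=
  if i < n then
    match PySem.List.pyGet? arr i with
    | none => s   -- IndexError; unreachable: arr always has length n when n > 0
    | some p => pvSumLoop n (i + 1) (arr.set i.toNat (p.1 + 1, p.2)) (s + p.1 + p.2)
  else s
termination_by (n - i).toNat
decreasing_by omega

def bench_class_array_index (n : Int) : Int :=
  pvSumLoop n 0 (pvBuildArr n 0 []) 0

-- ===== PORT B =====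
def bench_class_array_index_alt (n : Int) : Int :=
  if n > 0 then n * n else 0

-- ===== PRECONDITION & SPEC =====
def Spec_bench_class_array_index (n : Int) (out : Int) : Prop := out = bench_class_array_index_alt n
instance (n : Int) (out : Int) : Decidable (Spec_bench_class_array_index n out) := by unfold Spec_bench_class_array_index; infer_instance

-- ===== CLAIM (what is proved, stated in full; the proofs are below) =====
def Claim_equal_bench_class_array_index : Prop := ∀ (n : Int), Dom_bench_class_array_index n → Spec_bench_class_array_index n (bench_class_array_index n)

-- ===== LEMMAS AND PROOFS =====

-- pure description of the array the first loop builds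
def pvMkList (k : Nat) (start : Int) : List (Int × Int) :=
  match k with
  | 0 => []
  | k + 1 => (start, start + 1) :: pvMkList k (start + 1)

lemma pvMkList_getElem? (k : Nat) (start : Int) (j : Nat) (hj : j < k) :
    (pvMkList k start)[j]? = some (start + j, start + j + 1) := by
  induction k generalizing start j with
  | zero => omega
  | succ k ih =>
    cases j with
    | zero => simp [pvMkList]
    | succ j =>
      have := ih (start + 1) j (by omega)
      simp [pvMkList, this]
      omega

lemma pvBuildArr_eq (k : Nat) : ∀ (n i : Int) (arr : List (Int × Int)),
    (n - i).toNat = k → pvBuildArr n i arr = arr ++ pvMkList k i := by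
  induction k with
  | zero =>
    intro n i arr hk
    rw [pvBuildArr]
    simp [pvMkList, if_neg (by omega : ¬ i < n)]
  | succ k ih =>
    intro n i arr hk
    rw [pvBuildArr, if_pos (by omega : i < n), ih n (i + 1) _ (by omega)]
    simp [pvMkList]

lemma pvSumLoop_eq (k : Nat) : ∀ (n i : Int) (arr : List (Int × Int)) (s : Int),
    (n - i).toNat = k → 0 ≤ i → i ≤ n →
    (∀ j : Int, i ≤ j → j < n → PySem.List.pyGet? arr j = some (j, j + 1)) →
    pvSumLoop n i arr s = s + n * n - i * i := by
  induction k with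
  | zero =>
    intro n i arr s hk hi hin _
    rw [pvSumLoop, if_neg (by omega : ¬ i < n)]
    have : n = i := by omega
    subst this; ring
  | succ k ih =>
    intro n i arr s hk hi _ hget
    rw [pvSumLoop, if_pos (by omega : i < n), hget i le_rfl (by omega)]
    simp only
    have step := ih n (i + 1) (arr.set i.toNat (i + 1, i + 1)) (s + i + (i + 1)) (by omega) (by omega) (by omega) ?_
    · rw [step]; ring
    · intro j hj hjn
      have hj0 : 0 ≤ j := by omega
      rw [PySem.List.pyGet?_of_nonneg _ hj0] at *
      rw [List.getElem?_set_ne (by omega)]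
      have := hget j (by omega) hjn
      rwa [PySem.List.pyGet?_of_nonneg _ hj0] at this

-- ===== VERDICT (by name: the statement is the Claim_ definition above) =====
theorem bench_class_array_index_spec : Claim_equal_bench_class_array_index := by
  intro n _
  unfold Spec_bench_class_array_index bench_class_array_index bench_class_array_index_alt
  by_cases hn : 0 < n
  · rw [pvBuildArr_eq n.toNat n 0 [] (by omega)]
    rw [pvSumLoop_eq n.toNat n 0 _ 0 (by omega) le_rfl (by omega) ?_]
    · simp [if_pos hn]
    · intro j hj hjn
      rw [PySem.List.pyGet?_of_nonneg _ hj]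
      simp only [List.nil_append]
      have := pvMkList_getElem? n.toNat 0 j.toNat (by omega)
      rw [this]
      simp [Int.toNat_of_nonneg hj]
  · rw [pvSumLoop, if_neg (by omega : ¬ (0:Int) < n), if_neg hn]
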